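-- pv_equiv track=rewrite | github.com/filenotfoundhere/sakura | scripts/evaluation/generate_tool_analysis.py | detect_retry_patterns
-- ===== SOURCE A (Python) =====
-- from collections import Counter
-- from typing import Any, Dict, Iterable, List, Optional, Tuple
--
-- def detect_retry_patterns(trajectories: List[List[str]]) -> Dict[str, int]:
--     """Detect consecutive repeated tool calls (retries)."""
--     retry_counts: Counter[str] = Counter()
--     for trajectory in trajectories:
--         prev_tool: Optional[str] = None
--         for tool in trajectory:
--             if tool == prev_tool:
--                 retry_counts[tool] += 1
--             prev_tool = tool
--     return dict(retry_counts)
-- ===== SOURCE B (Python) =====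
-- from typing import Dict, List, Tuple
--
-- def _runs(traj: List[str]) -> List[Tuple[str, int]]:
--     """Run-length encode a trajectory into (tool, run_length) groups."""
--     runs = []
--     i = 0
--     n = len(traj)
--     while i < n:
--         j = i + 1
--         while j < n and traj[j] == traj[i]:
--             j += 1
--         runs.append((traj[i], j - i))
--         i = j
--     return runs
--
-- def detect_retry_patterns(trajectories: List[List[str]]) -> Dict[str, int]:
--     """Detect consecutive repeated tool calls (retries): a run of length k is k-1 retries."""
--     counts: Dict[str, int] = {}
--     for traj in trajectories:
--         for tool, k in _runs(traj):
--             if k > 1: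
--                 counts[tool] = counts.get(tool, 0) + (k - 1)
--     return counts
-- ===== Notes on version B (the rewrite author's own statement) =====
-- stated objective: alternative
-- what changed: Replaces the remember-previous-element counting loop by a two-stage algorithm: run-length encode each trajectory into (tool, run_length) groups, then add run_length-1 per run into a plain dict.
import Mathlib
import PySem

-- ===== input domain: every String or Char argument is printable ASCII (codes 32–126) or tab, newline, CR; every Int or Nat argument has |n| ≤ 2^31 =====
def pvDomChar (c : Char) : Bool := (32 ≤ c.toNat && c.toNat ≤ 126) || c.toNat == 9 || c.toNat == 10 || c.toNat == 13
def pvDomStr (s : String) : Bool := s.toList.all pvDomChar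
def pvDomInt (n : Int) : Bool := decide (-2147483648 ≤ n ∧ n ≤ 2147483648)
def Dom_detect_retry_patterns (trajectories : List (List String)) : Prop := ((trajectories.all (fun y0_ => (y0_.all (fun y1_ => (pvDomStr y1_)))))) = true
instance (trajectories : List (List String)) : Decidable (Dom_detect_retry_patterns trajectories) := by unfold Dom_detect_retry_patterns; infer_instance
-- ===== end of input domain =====

-- B replaces A's remember-previous-element loop by two stages: run-length encode
-- each trajectory, then add (run length - 1) per run into a dict. Same cost.

-- ===== PORT A =====
-- inner-loop step: 'if tool == prev_tool: retry_counts[tool] += 1; prev_tool = tool'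
-- (prev_tool : Option String; Python's 'tool == None' is False)
def pvStepA (st : PySem.Dict String Int × Option String) (tool : String) :
    PySem.Dict String Int × Option String :=
  (if st.2 == some tool then st.1.modify tool 0 (· + 1) else st.1, some tool)

def detect_retry_patterns (trajectories : List (List String)) : List (String × Int) :=
  (trajectories.foldl
    (fun retry_counts trajectory => (trajectory.foldl pvStepA (retry_counts, none)).1)
    PySem.Dict.empty).items

-- ===== PORT B =====
-- _runs: while traj: count the leading run of traj[0] (the inner while = takeWhile
-- over the tail), record (head, k), continue on traj[k:]
def pvRuns : List String → List (String × Int)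
  | [] => []
  | x :: rest =>
    let same := rest.takeWhile (fun t => t == x)
    (x, (same.length : Int) + 1) :: pvRuns (rest.drop same.length)
termination_by l => l.length
decreasing_by simp

-- 'if k > 1: counts[tool] = counts.get(tool, 0) + (k - 1)'
def pvStepB (c : PySem.Dict String Int) (p : String × Int) : PySem.Dict String Int :=
  if p.2 > 1 then c.insert p.1 (c.getD p.1 0 + (p.2 - 1)) else c

def detect_retry_patterns_alt (trajectories : List (List String)) : List (String × Int) :=
  (trajectories.foldl
    (fun counts traj => (pvRuns traj).foldl pvStepB counts)
    PySem.Dict.empty).items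

-- ===== PRECONDITION & SPEC =====
def Spec_detect_retry_patterns (trajectories : List (List String)) (out : List (String × Int)) : Prop := out = detect_retry_patterns_alt trajectories
instance (trajectories : List (List String)) (out : List (String × Int)) : Decidable (Spec_detect_retry_patterns trajectories out) := by unfold Spec_detect_retry_patterns; infer_instance

-- ===== CLAIM =====
def Claim_equal_detect_retry_patterns : Prop := ∀ (trajectories : List (List String)), Dom_detect_retry_patterns trajectories → Spec_detect_retry_patterns trajectories (detect_retry_patterns trajectories)

-- ===== LEMMAS AND PROOFS =====

-- proof-side helper: the list of retries of one trajectory (each element equal to its predecessor)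
def retF : List String → List String
  | [] => []
  | [_] => []
  | x :: y :: rest => (if x == y then [y] else []) ++ retF (y :: rest)

theorem innerA_some (l : List String) (d : PySem.Dict String Int) (x : String) :
    (l.foldl pvStepA (d, some x)).1
      = (retF (x :: l)).foldl (fun d t => d.modify t 0 (· + 1)) d := by
  induction l generalizing d x with
  | nil => simp [retF]
  | cons t rest ih =>
      simp only [List.foldl_cons, pvStepA, retF]
      rw [ih]
      by_cases h : x = t
      · subst h; simp
      · have h1 : (some x == some t) = false := by simp [h]
        have h2 : (x == t) = false := by simp [h]
        simp [h1, h2]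

theorem innerA_none (l : List String) (d : PySem.Dict String Int) :
    (l.foldl pvStepA (d, none)).1
      = (retF l).foldl (fun d t => d.modify t 0 (· + 1)) d := by
  cases l with
  | nil => simp [retF]
  | cons t rest =>
      simp only [List.foldl_cons, pvStepA]
      simpa using innerA_some rest d t

-- collapsing two modifies at the same key
theorem modify_modify_self (d : PySem.Dict String Int) (k : String) (f g : Int → Int) :
    (d.modify k 0 f).modify k 0 g = d.modify k 0 (g ∘ f) := by
  show (_ : PySem.Dict String Int).insert k _ = _
  rw [PySem.Dict.getD_modify_self]
  show ((d.insert k _).insert k _) = d.insert k _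
  rw [PySem.Dict.insert_insert_self]
  rfl

-- a block of n identical retries is one modify by +n
theorem repFold (n : ℕ) (x : String) (d : PySem.Dict String Int) :
    (List.replicate n x).foldl (fun d t => d.modify t 0 (· + 1)) d
      = if n = 0 then d else d.modify x 0 (· + (n : Int)) := by
  induction n generalizing d with
  | zero => simp
  | succ m ih =>
      rw [List.replicate_succ, List.foldl_cons, ih]
      by_cases hm : m = 0
      · subst hm; simp
      · simp only [hm, if_false, Nat.succ_ne_zero, if_false,
          modify_modify_self]
        congr 1; funext v; simp [Function.comp]; ring

-- retF decomposes along the leading run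
theorem retF_run (rest : List String) (x : String) :
    retF (x :: rest)
      = List.replicate (rest.takeWhile (fun t => t == x)).length x
        ++ retF (rest.drop (rest.takeWhile (fun t => t == x)).length) := by
  induction rest with
  | nil => simp [retF]
  | cons y r2 ih =>
      by_cases h : y = x
      · subst h
        simp only [List.takeWhile_cons, BEq.rfl, if_true, List.length_cons,
          List.replicate_succ, List.drop_succ_cons]
        show retF (y :: y :: r2) = _
        simp only [retF, BEq.rfl, if_true, List.singleton_append]
        rw [ih]
        rfl
      · have hb : (y == x) = false := by simp [h]
        show retF (x :: y :: r2) = _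
        simp only [retF, List.takeWhile_cons, hb]
        have hb2 : (x == y) = false := by simp [Ne.symm h]
        simp [hb2]

-- B's fold over the runs counts exactly the retries
theorem runsB_aux (n : ℕ) : ∀ (l : List String), l.length ≤ n → ∀ (c : PySem.Dict String Int),
    (pvRuns l).foldl pvStepB c
      = (retF l).foldl (fun d t => d.modify t 0 (· + 1)) c := by
  induction n with
  | zero =>
      intro l hl c
      have : l = [] := by cases l <;> simp_all
      subst this; simp [pvRuns, retF]
  | succ m ih =>
      intro l hl c
      cases l with
      | nil => simp [pvRuns, retF]
      | cons x rest =>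
      rw [pvRuns]
      simp only [List.foldl_cons, retF_run, List.foldl_append]
      set same := rest.takeWhile (fun t => t == x) with hsame
      rw [ih (rest.drop same.length) (by simp at hl ⊢; omega)]
      congr 1
      rw [repFold]
      by_cases h0 : (rest.takeWhile (fun t => t == x)).length = 0
      · simp [pvStepB, h0, same]
      · have : ¬ ((same.length : Int) + 1 ≤ 1) := by
          simp only [same]; omega
        simp only [pvStepB, same, gt_iff_lt, h0, if_false]
        rw [if_pos (by simp only [same] at *; omega)]
        show c.insert x _ = c.insert x _
        congr 1
        ring

theorem runsB (l : List String) (c : PySem.Dict String Int) :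
    (pvRuns l).foldl pvStepB c
      = (retF l).foldl (fun d t => d.modify t 0 (· + 1)) c :=
  runsB_aux l.length l le_rfl c

-- ===== VERDICT =====
theorem detect_retry_patterns_spec : Claim_equal_detect_retry_patterns := by
  intro ts _
  show detect_retry_patterns ts = detect_retry_patterns_alt ts
  unfold detect_retry_patterns detect_retry_patterns_alt
  exact congrArg (fun f => (List.foldl f PySem.Dict.empty ts).items)
    (funext fun d => funext fun traj => (innerA_none traj d).trans (runsB traj d).symm)
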